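-- pv_equiv track=rewrite | github.com/shikgom2/boj | 10747.py | optimized_string_removal
-- ===== SOURCE A (Python) =====
-- def failure(pattern):
--     lps = [0] * len(pattern)
--     length = 0
--
--     i = 1
--     while i < len(pattern):
--         if pattern[i] == pattern[length]:
--             length += 1
--             lps[i] = length
--             i += 1
--         else:
--             if length != 0:
--                 length = lps[length - 1]
--             else:
--                 lps[i] = 0
--                 i += 1
--     return lps
--
-- def optimized_string_removal(s, bomb):
--     stack = []
--     lps = failure(bomb)
--
--     for char in s:
--         stack.append(char)
--         if len(stack) >= len(bomb) and char == bomb[-1]: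
--             if ''.join(stack[-len(bomb):]) == bomb:
--                 del stack[-len(bomb):]
--
--     return ''.join(stack)
-- ===== SOURCE B (Python) =====
-- def optimized_string_removal(s, bomb):
--     # Fixed point of removing the leftmost occurrence of bomb.
--     if not bomb:
--         return s
--     t = s
--     while True:
--         i = t.find(bomb)
--         if i < 0:
--             return t
--         t = t[:i] + t[i + len(bomb):]
-- ===== Notes on version B (the rewrite author's own statement) =====
-- stated objective: simpler
-- what changed: Replaces the character stack with per-character suffix re-checks (plus a dead KMP failure-table computation) by a short fixed-point loop that repeatedly deletes the leftmost occurrence of bomb via str.find; equal because the stack always deletes the earliest-ending (= leftmost) occurrence of the current string.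
import Mathlib
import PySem

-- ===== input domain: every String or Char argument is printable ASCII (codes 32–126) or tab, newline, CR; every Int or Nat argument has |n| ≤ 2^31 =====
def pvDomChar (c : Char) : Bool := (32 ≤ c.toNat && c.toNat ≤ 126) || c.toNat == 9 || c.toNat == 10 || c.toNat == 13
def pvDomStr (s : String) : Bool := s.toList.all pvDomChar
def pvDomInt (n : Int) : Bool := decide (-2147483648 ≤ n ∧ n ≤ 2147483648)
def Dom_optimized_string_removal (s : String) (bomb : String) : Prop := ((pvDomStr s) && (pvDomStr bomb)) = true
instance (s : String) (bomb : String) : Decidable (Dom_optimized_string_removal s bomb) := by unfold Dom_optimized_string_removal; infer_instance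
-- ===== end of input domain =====

-- B replaces A's character stack (and A's dead KMP failure-table computation) by a short
-- fixed-point loop that repeatedly deletes the leftmost occurrence of bomb (objective: simpler).

-- ===== PORT A =====
-- failure(pattern): the KMP failure table. Its result is bound to `lps` in A but NEVER used.
-- Ported with fuel 2*len(pattern)+1, which covers every execution (each iteration either
-- advances i or strictly decreases length); indices are read with getD (always in range in Python).
def pyFailureAux (p : List Char) (lps : List Int) (len i : Nat) : Nat → List Int
  | 0 => lps
  | fuel+1 =>
    if i < p.length then
      if p.getD i ' ' = p.getD len ' ' then
        pyFailureAux p (lps.set i ((len : Int) + 1)) (len+1) (i+1) fuel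
      else if len ≠ 0 then
        pyFailureAux p lps ((lps.getD (len-1) 0).toNat) i fuel
      else
        pyFailureAux p (lps.set i 0) len (i+1) fuel
    else lps

def pyFailure (p : List Char) : List Int :=
  pyFailureAux p (List.replicate p.length 0) 0 1 (2 * p.length + 1)

-- the `for char in s` loop over the stack.  `''.join(stack[-m:]) == bomb` is
-- `st.drop (st.length - m) = b` and `del stack[-m:]` is `st.take (st.length - m)`:
-- exact, because both are only reached under the guard `len(stack) >= len(bomb)`.
-- `char == bomb[-1]` is `PySem.List.pyGet? b (-1) = some c` (none exactly where Python raises, i.e. bomb = "").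
def aLoop (b : List Char) (stack : List Char) : List Char → List Char
  | [] => stack
  | c :: rest =>
    if b.length ≤ (stack ++ [c]).length ∧ PySem.List.pyGet? b (-1) = some c ∧
        (stack ++ [c]).drop ((stack ++ [c]).length - b.length) = b then
      aLoop b ((stack ++ [c]).take ((stack ++ [c]).length - b.length)) rest
    else
      aLoop b (stack ++ [c]) rest

def optimized_string_removal (s : String) (bomb : String) : String :=
  let _lps := pyFailure bomb.toList
  String.ofList (aLoop bomb.toList [] s.toList)

-- ===== PORT B =====
-- t.find(bomb): the least index i with t[i:i+m] == bomb, scanning i upward; none = -1.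
-- The extra Nat argument is pure fuel (a totality guard): t.length + 1 - i scan positions remain.
def fOccAux (b t : List Char) (i : Nat) : Nat → Option Nat
  | 0 => none
  | fuel+1 =>
    if i + b.length ≤ t.length then
      if (t.drop i).take b.length = b then some i
      else fOccAux b t (i+1) fuel
    else none

def fOcc (b t : List Char) : Option Nat := fOccAux b t 0 (t.length + 1)

-- the `while True` loop: delete the leftmost occurrence until there is none.
-- Fuel t.length + 1 is a totality guard: every step deletes b.length ≥ 1 characters.
def bRun (b : List Char) : Nat → List Char → List Char
  | 0, t => t
  | fuel+1, t =>
    match fOcc b t with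
    | none => t
    | some i => bRun b fuel (t.take i ++ t.drop (i + b.length))

def optimized_string_removal_alt (s : String) (bomb : String) : String :=
  if bomb.toList = [] then s
  else String.ofList (bRun bomb.toList (s.toList.length + 1) s.toList)

-- ===== PRECONDITION & SPEC =====
-- A evaluates bomb[-1] for every character of s, so it raises IndexError exactly when
-- bomb is empty and s is not; only those crashing inputs are excluded (B returns s unchanged there).
def Pre_optimized_string_removal (s : String) (bomb : String) : Prop := s = "" ∨ bomb ≠ ""
instance (s : String) (bomb : String) : Decidable (Pre_optimized_string_removal s bomb) := by
  unfold Pre_optimized_string_removal; infer_instance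

def pvWitness_optimized_string_removal : String × String := ("mirkovC4nizCC44", "C4")

def Spec_optimized_string_removal (s : String) (bomb : String) (out : String) : Prop := out = optimized_string_removal_alt s bomb
instance (s : String) (bomb : String) (out : String) : Decidable (Spec_optimized_string_removal s bomb out) := by unfold Spec_optimized_string_removal; infer_instance

-- ===== CLAIM (what is proved, stated in full; the proofs are below) =====
def Claim_equal_optimized_string_removal : Prop := ∀ (s : String) (bomb : String), Dom_optimized_string_removal s bomb → Pre_optimized_string_removal s bomb → Spec_optimized_string_removal s bomb (optimized_string_removal s bomb)

-- ===== LEMMAS AND PROOFS =====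

-- if no window of t at an index ≥ i equals b, the scan fails (fuel covers the remaining positions)
theorem fOccAux_eq_none (b t : List Char) (fuel : Nat) :
    ∀ i, t.length + 1 ≤ i + fuel →
    (∀ j, i ≤ j → j + b.length ≤ t.length → (t.drop j).take b.length ≠ b) →
    fOccAux b t i fuel = none := by
  induction fuel with
  | zero => intro i _ _; rfl
  | succ fuel ih =>
    intro i hfuel h
    show (if i + b.length ≤ t.length then _ else none) = none
    by_cases hle : i + b.length ≤ t.length
    · rw [if_pos hle, if_neg (h i le_rfl hle)]
      exact ih (i+1) (by omega) (fun j hj => h j (by omega))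
    · rw [if_neg hle]

-- the scan returns the least matching index (fuel reaches position k)
theorem fOccAux_eq_some (b t : List Char) (fuel : Nat) :
    ∀ i k, i ≤ k → k + 1 ≤ i + fuel → k + b.length ≤ t.length →
    (t.drop k).take b.length = b →
    (∀ j, i ≤ j → j < k → (t.drop j).take b.length ≠ b) →
    fOccAux b t i fuel = some k := by
  induction fuel with
  | zero => intro i k hik hfuel _ _ _; omega
  | succ fuel ih =>
    intro i k hik hfuel hk hmatch hmin
    show (if i + b.length ≤ t.length then _ else none) = some k
    rcases Nat.lt_or_ge i k with hlt | hge
    · rw [if_pos (by omega : i + b.length ≤ t.length), if_neg (hmin i le_rfl hlt)]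
      exact ih (i+1) k (by omega) (by omega) hk hmatch (fun j hj hjk => hmin j (by omega) hjk)
    · have hik' : i = k := le_antisymm hik hge
      subst hik'
      rw [if_pos hk, if_pos hmatch]

theorem fOcc_eq_none (b t : List Char)
    (h : ∀ j, j + b.length ≤ t.length → (t.drop j).take b.length ≠ b) :
    fOcc b t = none :=
  fOccAux_eq_none b t (t.length + 1) 0 (by omega) (fun j _ hj => h j hj)

theorem fOcc_eq_some (b t : List Char) (k : Nat)
    (hk : k + b.length ≤ t.length) (hmatch : (t.drop k).take b.length = b)
    (hmin : ∀ j, j < k → (t.drop j).take b.length ≠ b) :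
    fOcc b t = some k :=
  fOccAux_eq_some b t (t.length + 1) 0 k (Nat.zero_le k) (by omega) hk hmatch
    (fun j _ hjk => hmin j hjk)

-- one unfolding step of the fixed-point loop
theorem bRun_succ (b : List Char) (f : Nat) (t : List Char) :
    bRun b (f+1) t = match fOcc b t with
      | none => t
      | some i => bRun b f (t.take i ++ t.drop (i + b.length)) := rfl

-- MAIN INVARIANT: if the stack contains no occurrence of b, running A's stack loop on the
-- remainder equals B's leftmost-removal fixed point on stack ++ remainder (with enough fuel).
theorem aLoop_eq_bRun (b : List Char) (hb : b ≠ []) (rest : List Char) :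
    ∀ (st : List Char) (fuel : Nat), (st ++ rest).length < fuel →
      (∀ j, j + b.length ≤ st.length → (st.drop j).take b.length ≠ b) →
      aLoop b st rest = bRun b fuel (st ++ rest) := by
  have hm1 : 0 < b.length := List.length_pos_iff.mpr hb
  induction rest with
  | nil =>
    intro st fuel hfuel hno
    rw [List.append_nil] at *
    obtain ⟨f, rfl⟩ : ∃ f, fuel = f + 1 := ⟨fuel - 1, by omega⟩
    rw [bRun_succ, fOcc_eq_none b st (fun j hj => hno j hj), aLoop]
  | cons c r ih =>
    intro st fuel hfuel hno
    obtain ⟨f, rfl⟩ : ∃ f, fuel = f + 1 := ⟨fuel - 1, by omega⟩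
    rw [aLoop]
    set st' := st ++ [c] with hst'
    have hlen' : st'.length = st.length + 1 := by simp [hst']
    by_cases hcond : b.length ≤ st'.length ∧ PySem.List.pyGet? b (-1) = some c ∧
        st'.drop (st'.length - b.length) = b
    · rw [if_pos hcond]
      obtain ⟨hlen, _hlast, hsuf⟩ := hcond
      set k := st.length + 1 - b.length with hk
      have hkk : st'.length - b.length = k := by omega
      have hkst : k ≤ st.length := by omega
      have htake : st'.take k = st.take k := by
        rw [hst']; exact List.take_append_of_le_length hkst
      have hno' : ∀ j, j + b.length ≤ (st'.take k).length → ((st'.take k).drop j).take b.length ≠ b := by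
        intro j hj
        have hlenk : (st'.take k).length = k := by rw [List.length_take]; omega
        rw [hlenk] at hj
        rw [htake, List.drop_take, List.take_take, min_eq_left (by omega : b.length ≤ k - j)]
        exact hno j (by omega)
      have hflt : ((st'.take k) ++ r).length < f := by
        have : (st'.take k).length = k := by rw [List.length_take]; omega
        simp only [List.length_append, List.length_cons, this] at hfuel ⊢
        omega
      have hIH := ih (st'.take k) f hflt hno'
      rw [hkk, hIH]
      have hts : st ++ c :: r = st' ++ r := by simp [hst']
      rw [hts]
      have hfo : fOcc b (st' ++ r) = some k := by
        apply fOcc_eq_some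
        · rw [List.length_append, hlen']; omega
        · rw [List.drop_append_of_le_length (by omega : k ≤ st'.length)]
          have hdl : (st'.drop k).length = b.length := by rw [List.length_drop]; omega
          rw [List.take_append_of_le_length (le_of_eq hdl.symm)]
          calc (st'.drop k).take b.length = st'.drop k := List.take_of_length_le (le_of_eq hdl)
            _ = b := by rw [← hkk]; exact hsuf
        · intro j hjk
          rw [List.drop_append_of_le_length (by omega : j ≤ st'.length)]
          rw [List.take_append_of_le_length (by rw [List.length_drop]; omega)]
          rw [hst', List.drop_append_of_le_length (by omega : j ≤ st.length)]
          rw [List.take_append_of_le_length (by rw [List.length_drop]; omega)]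
          exact hno j (by omega)
      rw [bRun_succ, hfo]
      congr 1
      symm
      rw [List.take_append_of_le_length (by omega : k ≤ st'.length), htake]
      have hkm : k + b.length = st'.length := by omega
      rw [hkm, List.drop_left]
    · rw [if_neg hcond]
      have hno' : ∀ j, j + b.length ≤ st'.length → (st'.drop j).take b.length ≠ b := by
        intro j hj
        rcases Nat.lt_or_ge (j + b.length) st'.length with hlt | hge
        · rw [hst', List.drop_append_of_le_length (by omega : j ≤ st.length),
              List.take_append_of_le_length (by rw [List.length_drop]; omega)]
          exact hno j (by omega)
        · have hje : j + b.length = st'.length := le_antisymm hj hge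
          intro heq
          have hjst : j ≤ st.length := by omega
          have hdl : (st'.drop j).length = b.length := by rw [List.length_drop]; omega
          have hfull : st'.drop j = b := by
            calc st'.drop j = (st'.drop j).take b.length := (List.take_of_length_le (le_of_eq hdl)).symm
              _ = b := heq
          have hsplit : st'.drop j = st.drop j ++ [c] := by
            rw [hst']; exact List.drop_append_of_le_length hjst
          exact hcond ⟨by omega,
            by rw [← hfull, hsplit]; exact PySem.List.pyGet?_neg_one_append_singleton _ _,
            by rw [(by omega : st'.length - b.length = j)]; exact hfull⟩
      have hflt : (st' ++ r).length < f + 1 := by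
        simp only [List.length_append, List.length_cons, hlen'] at hfuel ⊢
        omega
      have hIH := ih st' (f + 1) hflt hno'
      rw [hIH]
      congr 1
      simp [hst']

-- ===== VERDICT (by name: the statement is the Claim_ definition above) =====
theorem optimized_string_removal_spec : Claim_equal_optimized_string_removal := by
  intro s bomb _hdom hpre
  unfold Spec_optimized_string_removal optimized_string_removal optimized_string_removal_alt
  by_cases hb : bomb.toList = []
  · rw [if_pos hb]
    have hbomb : bomb = "" := String.toList_eq_nil_iff.mp hb
    have hs : s = "" := by
      rcases hpre with h | h
      · exact h
      · exact absurd hbomb h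
    subst hbomb hs
    rfl
  · rw [if_neg hb]
    show String.ofList (aLoop bomb.toList [] s.toList) = String.ofList (bRun bomb.toList (s.toList.length + 1) s.toList)
    have hmain := aLoop_eq_bRun bomb.toList hb s.toList [] (s.toList.length + 1)
      (by simp)
      (fun j hj => by
        exfalso
        have : 0 < bomb.toList.length := List.length_pos_iff.mpr hb
        simp only [List.length_nil] at hj
        omega)
    rw [List.nil_append] at hmain
    rw [hmain]
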